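-- pv_equiv track=rewrite | github.com/diljotgrewal/telomere_utils | telomere_utils/extract_reads.py | _find_telomere_end_in_seq_forwards
-- ===== SOURCE A (Python) =====
-- def _find_telomere_end_in_seq_forwards(query_sequence, kmers):
--     end_pos = None
--     i = 0
--
--     while i < (len(query_sequence) - 5):
--         if any(tr == query_sequence[i:(i + 6)] for tr in kmers):
--             end_pos = i + 6
--             i += 6
--         else:
--             i += 1
--
--     return 0, end_pos
-- ===== SOURCE B (Python) =====
-- def _find_telomere_end_in_seq_forwards(query_sequence, kmers):
--     # Phase 1: all (possibly overlapping) positions whose 6-char window is a kmer.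
--     k6 = {k for k in kmers if len(k) == 6}
--     occurrences = [i for i in range(len(query_sequence) - 5)
--                    if query_sequence[i:i + 6] in k6]
--     # Phase 2: greedy non-overlapping selection; the last selected match's end wins.
--     end_pos = None
--     cur = 0
--     for s in occurrences:
--         if s >= cur:
--             cur = s + 6
--             end_pos = cur
--     return 0, end_pos
-- ===== Notes on version B (the rewrite author's own statement) =====
-- stated objective: faster
-- what changed: A is a single jump-by-6 while-loop testing each window with any() over the whole kmer list; B first collects all overlapping 6-mer match positions in one comprehension against a set of the length-6 kmers, then resolves A's greedy non-overlapping scan by a linear sweep over that position list keeping matches that start at or past the current cursor.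
import Mathlib
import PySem

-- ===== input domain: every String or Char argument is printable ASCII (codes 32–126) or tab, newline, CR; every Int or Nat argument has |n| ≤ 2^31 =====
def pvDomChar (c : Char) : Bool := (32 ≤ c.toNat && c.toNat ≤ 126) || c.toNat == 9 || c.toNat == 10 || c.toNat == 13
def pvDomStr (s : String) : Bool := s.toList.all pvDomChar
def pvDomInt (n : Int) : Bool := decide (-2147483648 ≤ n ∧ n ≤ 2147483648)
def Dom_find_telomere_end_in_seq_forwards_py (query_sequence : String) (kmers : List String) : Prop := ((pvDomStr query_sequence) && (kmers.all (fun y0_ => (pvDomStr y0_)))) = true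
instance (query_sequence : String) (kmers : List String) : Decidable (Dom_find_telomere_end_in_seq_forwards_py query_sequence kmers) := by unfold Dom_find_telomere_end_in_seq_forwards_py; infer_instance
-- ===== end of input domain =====

-- B replaces A's jump-by-6 while-loop by two phases: a comprehension collecting all
-- (overlapping) 6-mer match positions against a set of the length-6 kmers, then a linear
-- sweep over that list keeping matches that start at or past the current cursor (objective: alternative).

-- ===== PORT A =====
-- A's while loop as structural recursion on the remaining positions; Python strings are
-- ported as their List Char; 'tr == q[i:i+6]' compares char lists (exact for strings).
def aGo (q : List Char) (kmers : List String) (i : Nat) (e : Option Int) : Option Int :=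
  if h : (i : Int) < (q.length : Int) - 5 then
    if kmers.any (fun tr => tr.toList == PySem.List.slice q (some (i : Int)) (some ((i : Int) + 6))) then
      aGo q kmers (i + 6) (some ((i + 6 : Nat) : Int))
    else
      aGo q kmers (i + 1) e
  else e
termination_by q.length - i
decreasing_by all_goals omega

def find_telomere_end_in_seq_forwards_py (query_sequence : String) (kmers : List String) : List (Option Int) :=
  [some 0, aGo query_sequence.toList kmers 0 none]

-- ===== PORT B =====
-- set comprehension {k for k in kmers if len(k) == 6}; set elements are strings,
-- represented (exactly, values only looked up by membership) as their char lists.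
def bK6 (kmers : List String) : PySem.Set (List Char) :=
  PySem.Set.ofList ((kmers.filter (fun k => k.toList.length == 6)).map String.toList)

def find_telomere_end_in_seq_forwards_py_alt (query_sequence : String) (kmers : List String) : List (Option Int) :=
  let q := query_sequence.toList
  let k6 := bK6 kmers
  -- [i for i in range(len(q) - 5) if q[i:i+6] in k6]; range(n) with n ≥ 0 is List.range,
  -- and the slice at 0 ≤ i is drop/take (exact here)
  let occurrences := (List.range (q.length - 5)).filter
      (fun i => PySem.Set.contains k6 ((q.drop i).take 6))
  let st := occurrences.foldl
      (fun (st : Nat × Option Int) (s : Nat) =>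
        if st.1 ≤ s then (s + 6, some ((s + 6 : Nat) : Int)) else st)
      ((0 : Nat), (none : Option Int))
  [some 0, st.2]

-- ===== PRECONDITION & SPEC =====
def Spec_find_telomere_end_in_seq_forwards_py (query_sequence : String) (kmers : List String) (out : List (Option Int)) : Prop := out = find_telomere_end_in_seq_forwards_py_alt query_sequence kmers
instance (query_sequence : String) (kmers : List String) (out : List (Option Int)) : Decidable (Spec_find_telomere_end_in_seq_forwards_py query_sequence kmers out) := by unfold Spec_find_telomere_end_in_seq_forwards_py; infer_instance

-- ===== CLAIM (what is proved, stated in full; the proofs are below) =====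
def Claim_equal_find_telomere_end_in_seq_forwards_py : Prop := ∀ (query_sequence : String) (kmers : List String), Dom_find_telomere_end_in_seq_forwards_py query_sequence kmers → Spec_find_telomere_end_in_seq_forwards_py query_sequence kmers (find_telomere_end_in_seq_forwards_py query_sequence kmers)

-- ===== LEMMAS AND PROOFS =====

-- membership in the set of length-6 kmers agrees with A's any(...) scan, for 6-char windows
theorem contains_bK6_eq (kmers : List String) (w : List Char) (hw : w.length = 6) :
    PySem.Set.contains (bK6 kmers) w = kmers.any (fun tr => tr.toList == w) := by
  rw [Bool.eq_iff_iff, PySem.Set.contains_iff, List.any_eq_true]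
  unfold bK6
  rw [PySem.Set.mem_ofList]
  simp only [List.mem_map, List.mem_filter, beq_iff_eq]
  constructor
  · rintro ⟨k, ⟨hk, _⟩, rfl⟩
    exact ⟨k, hk, by simp⟩
  · rintro ⟨k, hk, he⟩
    have hkw : k.toList = w := by simpa using he
    exact ⟨k, ⟨hk, by simp [hkw, hw]⟩, hkw⟩

-- B's guarded sweep over positions [i, i+k) equals A's jump-by-6 scan resumed at max i cur
theorem bfold_eq_aGo (q : List Char) (kmers : List String) :
    ∀ (k i cur : Nat) (e : Option Int), i + k = q.length - 5 →
    ((List.range' i k).foldl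
        (fun (st : Nat × Option Int) (s : Nat) =>
          if PySem.Set.contains (bK6 kmers) ((q.drop s).take 6) then
            (if st.1 ≤ s then (s + 6, some ((s + 6 : Nat) : Int)) else st)
          else st)
        ((cur, e) : Nat × Option Int)).2
      = aGo q kmers (max i cur) e := by
  intro k
  induction k with
  | zero =>
    intro i cur e hik
    rw [List.range', List.foldl_nil, aGo, dif_neg (by
      have := Nat.le_max_left i cur
      omega)]
  | succ k ih =>
    intro i cur e hik
    rw [List.range'_succ, List.foldl_cons]
    have hlen : ((q.drop i).take 6).length = 6 := by
      simp only [List.length_take, List.length_drop]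
      omega
    have hmeq : PySem.Set.contains (bK6 kmers) ((q.drop i).take 6)
        = kmers.any (fun tr => tr.toList == PySem.List.slice q (some (i : Int)) (some ((i : Int) + 6))) := by
      rw [contains_bK6_eq kmers _ hlen]
      have hslice : PySem.List.slice q (some (i : Int)) (some ((i : Int) + 6)) = (q.drop i).take 6 := by
        simpa using PySem.List.slice_natCast_add (xs := q) (j := i) (n := 6)
      rw [hslice]
    by_cases hc : cur ≤ i
    · rw [Nat.max_eq_left hc]
      conv_rhs => rw [aGo]
      rw [dif_pos (by omega)]
      by_cases hm : kmers.any (fun tr => tr.toList == PySem.List.slice q (some (i : Int)) (some ((i : Int) + 6))) = true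
      · rw [hmeq, if_pos hm, if_pos hm,
           if_pos (show ((cur, e) : Nat × Option Int).1 ≤ i from hc),
           ih (i + 1) (i + 6) _ (by omega), Nat.max_eq_right (by omega)]
      · rw [Bool.not_eq_true] at hm
        rw [hmeq, hm]
        simp only [Bool.false_eq_true, if_false]
        rw [ih (i + 1) cur e (by omega), Nat.max_eq_left (by omega)]
    · rw [hmeq]
      have hst :
          (if kmers.any (fun tr => tr.toList == PySem.List.slice q (some (i : Int)) (some ((i : Int) + 6))) then
            (if ((cur, e) : Nat × Option Int).1 ≤ i then ((i + 6 : Nat), some ((i + 6 : Nat) : Int)) else (cur, e))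
          else (cur, e)) = ((cur, e) : Nat × Option Int) := by
        have h2 : ¬ ((cur, e) : Nat × Option Int).1 ≤ i := by simpa using hc
        rw [if_neg h2, ite_self]
      rw [hst, ih (i + 1) cur e (by omega),
         Nat.max_eq_right (show i + 1 ≤ cur by omega), Nat.max_eq_right (show i ≤ cur by omega)]

-- ===== VERDICT (by name: the statement is the Claim_ definition above) =====
theorem find_telomere_end_in_seq_forwards_py_spec : Claim_equal_find_telomere_end_in_seq_forwards_py := by
  intro query_sequence kmers _
  unfold Spec_find_telomere_end_in_seq_forwards_py
  unfold find_telomere_end_in_seq_forwards_py find_telomere_end_in_seq_forwards_py_alt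
  set q := query_sequence.toList with hq
  congr 1
  congr 1
  rw [← PySem.List.foldl_if_eq_foldl_filter, List.range_eq_range']
  have h := bfold_eq_aGo q kmers (q.length - 5) 0 0 none (by omega)
  simpa using h.symm
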